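-- pv_equiv track=rewrite | github.com/WillDng/IMACLIM-Country | src/Loading_data_lib.py | filter_accounts_type
-- ===== SOURCE A (Python) =====
-- import copy
-- from typing import (Any, Dict, List, Iterator, Tuple, Union)
--
-- def filter_accounts_type(to_modify_accounts: Dict[str, str]
--                          ) -> (Dict[str, str], Dict[str, str]):
--     to_pick_accounts = copy.deepcopy(to_modify_accounts)
--     to_trim_accounts = dict()
--     to_delete_marker = '  '
--     for to_modify_account, account_category in to_modify_accounts.items():
--         if ((isinstance(account_category, str)) and
--             (account_category.startswith(to_delete_marker))):
--             to_trim_accounts[to_modify_account] = account_category.lstrip(to_delete_marker)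
--             del to_pick_accounts[to_modify_account]
--     return to_pick_accounts, to_trim_accounts
-- ===== SOURCE B (Python) =====
-- def filter_accounts_type(to_modify_accounts):
--     to_delete_marker = '  '
--     to_trim_accounts = {account: category.lstrip(to_delete_marker)
--                         for account, category in to_modify_accounts.items()
--                         if category.startswith(to_delete_marker)}
--     to_pick_accounts = {account: category
--                         for account, category in to_modify_accounts.items()
--                         if not category.startswith(to_delete_marker)}
--     return to_pick_accounts, to_trim_accounts
-- ===== Notes on version B (the rewrite author's own statement) =====
-- stated objective: simpler
-- what changed: Instead of deep-copying the whole dict and deleting matched keys from the copy, B builds the two result dicts directly with two comprehensions that partition the items by the ' ' prefix.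
import Mathlib
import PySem

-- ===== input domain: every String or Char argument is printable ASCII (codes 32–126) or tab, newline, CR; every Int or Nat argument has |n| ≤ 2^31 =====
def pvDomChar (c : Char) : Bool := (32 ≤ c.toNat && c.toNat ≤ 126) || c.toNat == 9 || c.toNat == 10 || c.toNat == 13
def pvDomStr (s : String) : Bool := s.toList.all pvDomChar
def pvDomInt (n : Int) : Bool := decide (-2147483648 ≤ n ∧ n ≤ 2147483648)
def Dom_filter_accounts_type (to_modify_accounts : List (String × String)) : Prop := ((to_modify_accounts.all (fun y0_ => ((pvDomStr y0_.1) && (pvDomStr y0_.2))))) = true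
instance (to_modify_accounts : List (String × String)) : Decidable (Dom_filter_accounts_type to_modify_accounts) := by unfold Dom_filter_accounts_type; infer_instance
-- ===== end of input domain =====

-- B replaces A's deepcopy-then-delete loop by two dict comprehensions that partition the items; simpler and avoids the full-dict copy.


-- ===== PORT A =====
-- shared helpers for the Python expressions both sources contain literally:
-- category.startswith('  ')   and   category.lstrip('  ') (strips ALL leading chars of the set {' '})
def pvMarker (kv : String × String) : Bool := PySem.Str.startswith kv.2 "  "
-- exact port of str.lstrip(chars): drop leading characters that belong to chars (PySem has no lstrip-with-chars)
def pvLstripChars (s chars : String) : String := String.ofList (s.toList.dropWhile (fun c => chars.toList.contains c))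

-- loop body of A: if the category starts with the marker, record the trimmed entry and delete the key from the copy
def pvStepA (st : PySem.Dict String String × PySem.Dict String String) (kv : String × String) :
    PySem.Dict String String × PySem.Dict String String :=
  if pvMarker kv then (st.1.erase kv.1, st.2.insert kv.1 (pvLstripChars kv.2 "  ")) else st

-- the dict argument arrives as an association list: both ports decode it with PySem.Dict.ofList (Python dict semantics)
def filter_accounts_type (to_modify_accounts : List (String × String)) : (List (String × String)) × (List (String × String)) :=
  let d := PySem.Dict.ofList to_modify_accounts
  -- to_pick_accounts = deepcopy(d); to_trim_accounts = {}
  let res := d.items.foldl pvStepA (d, PySem.Dict.empty)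
  (res.1.items, res.2.items)

-- ===== PORT B =====
def filter_accounts_type_alt (to_modify_accounts : List (String × String)) : (List (String × String)) × (List (String × String)) :=
  let items := (PySem.Dict.ofList to_modify_accounts).items
  -- keys of a dict's items are distinct, so each comprehension is exactly a filter (map applied to the kept items)
  let to_trim_accounts := (items.filter (fun kv => pvMarker kv)).map (fun kv => (kv.1, pvLstripChars kv.2 "  "))
  let to_pick_accounts := items.filter (fun kv => !pvMarker kv)
  (to_pick_accounts, to_trim_accounts)

-- ===== PRECONDITION & SPEC =====
def Spec_filter_accounts_type (to_modify_accounts : List (String × String)) (out : (List (String × String)) × (List (String × String))) : Prop := out = filter_accounts_type_alt to_modify_accounts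
instance (to_modify_accounts : List (String × String)) (out : (List (String × String)) × (List (String × String))) : Decidable (Spec_filter_accounts_type to_modify_accounts out) := by unfold Spec_filter_accounts_type; infer_instance

-- ===== CLAIM (what is proved, stated in full; the proofs are below) =====
def Claim_equal_filter_accounts_type : Prop := ∀ (to_modify_accounts : List (String × String)), Dom_filter_accounts_type to_modify_accounts → Spec_filter_accounts_type to_modify_accounts (filter_accounts_type to_modify_accounts)

-- ===== LEMMAS AND PROOFS =====

-- A's loop splits into an erase-only fold on the pick dict and a plain append on the trim dict,
-- provided the keys still to be processed are distinct and absent from the trim dict.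
theorem pvSplitFold (rest : List (String × String)) (pick trim : PySem.Dict String String)
    (hnd : (rest.map Prod.fst).Nodup)
    (htrim : ∀ kv ∈ rest, trim.contains kv.1 = false) :
    rest.foldl pvStepA (pick, trim) =
      (rest.foldl (fun d kv => if pvMarker kv then d.erase kv.1 else d) pick,
       PySem.Dict.mk (trim.items ++ (rest.filter (fun kv => pvMarker kv)).map
         (fun kv => (kv.1, pvLstripChars kv.2 "  ")))) := by
  induction rest generalizing pick trim with
  | nil => simp
  | cons kv rest ih =>
    have hhead : trim.contains kv.1 = false := htrim kv (by simp)
    have hndtail : (rest.map Prod.fst).Nodup := hnd.of_cons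
    have hkv : kv.1 ∉ rest.map Prod.fst := by
      simpa using (List.nodup_cons.mp hnd).1
    by_cases hp : pvMarker kv
    · have htrim' : ∀ kv' ∈ rest, (trim.insert kv.1 (pvLstripChars kv.2 "  ")).contains kv'.1 = false := by
        intro kv' hmem
        have hne : kv'.1 ≠ kv.1 := by
          intro h; exact hkv (h ▸ List.mem_map_of_mem hmem)
        rw [PySem.Dict.contains_insert]
        simp [hne, htrim kv' (by simp [hmem])]
      have hins : (trim.insert kv.1 (pvLstripChars kv.2 "  ")).items
          = trim.items ++ [(kv.1, pvLstripChars kv.2 "  ")] :=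
        PySem.Dict.items_insert_of_not_contains trim _ hhead
      simp only [List.foldl_cons, pvStepA, hp, if_true]
      rw [ih _ _ hndtail htrim']
      simp [hins, hp, List.append_assoc]
    · simp only [List.foldl_cons, pvStepA, hp, if_false, Bool.false_eq_true]
      rw [ih _ _ hndtail (fun kv' hm => htrim kv' (by simp [hm]))]
      simp [hp]

-- the erase-only fold is a filter: an item survives iff it is not a marked item whose key occurs in rest
theorem pvEraseFold (rest : List (String × String)) (pick : PySem.Dict String String)
    (h : ∀ x ∈ pick.items, ∀ y ∈ rest, y.1 = x.1 → pvMarker y = pvMarker x) :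
    (rest.foldl (fun d kv => if pvMarker kv then d.erase kv.1 else d) pick).items
      = pick.items.filter (fun x => !(pvMarker x && (rest.map Prod.fst).contains x.1)) := by
  induction rest generalizing pick with
  | nil => simp
  | cons kv rest ih =>
    by_cases hp : pvMarker kv
    · simp only [List.foldl_cons, hp, if_true]
      have hsub : ∀ x ∈ (pick.erase kv.1).items, ∀ y ∈ rest, y.1 = x.1 → pvMarker y = pvMarker x := by
        intro x hx y hy hxy
        have : x ∈ pick.items := by
          have := hx; simp only [PySem.Dict.erase, List.mem_filter] at this
          exact this.1
        exact h x this y (by simp [hy]) hxy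
      rw [ih _ hsub]
      show (List.filter _ pick.items).filter _ = _
      rw [List.filter_filter]
      apply List.filter_congr
      intro x hx
      by_cases hk : x.1 = kv.1
      · have hpx : pvMarker x = true := by
          rw [← h x hx kv (by simp) hk.symm]; exact hp
        simp [hk, hpx]
      · have hb : (x.1 == kv.1) = false := by simp [hk]
        simp [hb]
    · simp only [List.foldl_cons, hp, if_false, Bool.false_eq_true]
      rw [ih _ (fun x hx y hy hxy => h x hx y (by simp [hy]) hxy)]
      apply List.filter_congr
      intro x hx
      by_cases hk : x.1 = kv.1
      · have hpx : pvMarker x = false := by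
          rw [← h x hx kv (by simp) hk.symm]; simpa using hp
        simp [hpx]
      · have hb : (x.1 == kv.1) = false := by simp [hk]
        simp [hb]

-- nodup keys make the key a determiner of the whole item
theorem pvKeyInj (l : List (String × String)) (hnd : (l.map Prod.fst).Nodup)
    {x y : String × String} (hx : x ∈ l) (hy : y ∈ l) (hxy : y.1 = x.1) : y = x := by
  exact List.inj_on_of_nodup_map hnd hy hx hxy

-- ===== VERDICT (by name: the statement is the Claim_ definition above) =====
theorem filter_accounts_type_spec : Claim_equal_filter_accounts_type := by
  intro l _
  unfold Spec_filter_accounts_type filter_accounts_type filter_accounts_type_alt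
  dsimp only
  set d := PySem.Dict.ofList l with hd
  have hnd : (d.items.map Prod.fst).Nodup := by
    simpa [PySem.Dict.keys] using PySem.Dict.nodup_keys_ofList (κ := String) (ν := String) l
  have htrim : ∀ kv ∈ d.items, (PySem.Dict.empty (κ := String) (ν := String)).contains kv.1 = false := by
    intro kv _; simp [PySem.Dict.contains_empty]
  rw [pvSplitFold d.items d PySem.Dict.empty hnd htrim]
  have hinj : ∀ x ∈ d.items, ∀ y ∈ d.items, y.1 = x.1 → pvMarker y = pvMarker x := by
    intro x hx y hy hxy
    rw [pvKeyInj d.items hnd hx hy hxy]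
  rw [pvEraseFold d.items d hinj]
  simp only [Prod.mk.injEq]
  refine ⟨List.filter_congr ?_, by simp [PySem.Dict.empty]⟩
  intro x hx
  have hm : x.1 ∈ List.map Prod.fst d.items := List.mem_map_of_mem hx
  simp [hm]
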